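-- pv_equiv track=rewrite | github.com/sagebei/cdl | algorithms/benckmarking/sa.py | string123
-- ===== SOURCE A (Python) =====
-- def cutrules(Lsingle, k):
--     Lred = []
--     for v in Lsingle:
--         if (v[0][2] == k):
--             Lred.append([v[0], v[1]])
--     return Lred
--
-- def string123(Lsingle):
--     rules3 = cutrules(Lsingle, 3)
--     excp = []
--     for r in rules3:
--         if (r[1] == '1N3'):
--             excp.append([2, 3, 1])
--             excp.append([3, 2, 1])
--         if (r[1] == '1N2'):
--             excp.append([2, 1, 3])
--             excp.append([3, 1, 2])
--         if (r[1] == '2N1'):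
--             excp.append([2, 1, 3])
--             excp.append([2, 3, 1])
--         if (r[1] == '2N3'):
--             excp.append([1, 3, 2])
--             excp.append([3, 1, 2])
--         if (r[1] == '3N1'):
--             excp.append([3, 1, 2])
--             excp.append([3, 2, 1])
--         if (r[1] == '3N2'):
--             excp.append([1, 3, 2])
--             excp.append([2, 3, 1])
--         if (r[1] == '1N1'):
--             excp.append([1, 2, 3])
--             excp.append([1, 3, 2])
--         if (r[1] == '2N2'):
--             excp.append([1, 2, 3])
--             excp.append([3, 2, 1])
--         if (r[1] == '3N3'):
--             excp.append([1, 2, 3])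
--             excp.append([2, 1, 3])
--     res = []
--     for q in [[1, 2, 3], [1, 3, 2], [2, 1, 3], [2, 3, 1], [3, 1, 2], [3, 2, 1]]:
--         if not (q in excp):
--             res.append(q)
--     return res
-- ===== SOURCE B (Python) =====
-- PERMS = [[1, 2, 3], [1, 3, 2], [2, 1, 3], [2, 3, 1], [3, 1, 2], [3, 2, 1]]
--
--
-- def _parse(code):
--     # 'aNb' means: value a must not sit at position b
--     if len(code) == 3 and code[1] == 'N' and code[0] in '123' and code[2] in '123':
--         return (int(code[0]), int(code[2]))
--     return None
--
--
-- def string123(Lsingle):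
--     pairs = []
--     for v in Lsingle:
--         if v[0][2] == 3:
--             p = _parse(v[1])
--             if p is not None:
--                 pairs.append(p)
--     return [q for q in PERMS if not any(q[b - 1] == a for (a, b) in pairs)]
-- ===== Notes on version B (the rewrite author's own statement) =====
-- stated objective: simpler
-- what changed: Replaces the 9-branch hard-coded exclusion table with parsing each rule code 'aNb' into a pair (a,b) and keeping the permutations q with q[b-1] != a for every parsed pair.
import Mathlib
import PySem

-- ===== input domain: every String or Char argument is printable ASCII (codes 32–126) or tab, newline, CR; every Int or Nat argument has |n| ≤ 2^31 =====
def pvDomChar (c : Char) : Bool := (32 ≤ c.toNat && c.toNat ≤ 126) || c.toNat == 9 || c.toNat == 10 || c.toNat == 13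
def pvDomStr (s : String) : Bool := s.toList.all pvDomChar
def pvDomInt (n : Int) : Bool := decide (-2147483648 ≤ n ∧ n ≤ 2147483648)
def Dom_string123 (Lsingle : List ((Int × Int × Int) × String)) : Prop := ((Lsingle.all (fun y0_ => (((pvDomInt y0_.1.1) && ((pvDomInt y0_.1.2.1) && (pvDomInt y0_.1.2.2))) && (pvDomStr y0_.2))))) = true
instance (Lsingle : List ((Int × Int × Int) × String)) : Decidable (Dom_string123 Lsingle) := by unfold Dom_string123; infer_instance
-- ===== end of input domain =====

-- B replaces A's hard-coded 9-branch exclusion table by parsing each rule code 'aNb'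
-- into the positional constraint "value a not at position b" (objective: simpler).

-- ===== PORT A =====
def cutrules (Lsingle : List ((Int × Int × Int) × String)) (k : Int) :
    List ((Int × Int × Int) × String) :=
  Lsingle.foldl (fun Lred v => if v.1.2.2 = k then Lred ++ [(v.1, v.2)] else Lred) []

-- one iteration of A's excp-building loop (the nine sequential ifs)
def excpStep (e : List (List Int)) (r : (Int × Int × Int) × String) : List (List Int) :=
  let e := if r.2 = "1N3" then e ++ [[2,3,1],[3,2,1]] else e
  let e := if r.2 = "1N2" then e ++ [[2,1,3],[3,1,2]] else e
  let e := if r.2 = "2N1" then e ++ [[2,1,3],[2,3,1]] else e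
  let e := if r.2 = "2N3" then e ++ [[1,3,2],[3,1,2]] else e
  let e := if r.2 = "3N1" then e ++ [[3,1,2],[3,2,1]] else e
  let e := if r.2 = "3N2" then e ++ [[1,3,2],[2,3,1]] else e
  let e := if r.2 = "1N1" then e ++ [[1,2,3],[1,3,2]] else e
  let e := if r.2 = "2N2" then e ++ [[1,2,3],[3,2,1]] else e
  let e := if r.2 = "3N3" then e ++ [[1,2,3],[2,1,3]] else e
  e

def string123 (Lsingle : List ((Int × Int × Int) × String)) : List (List Int) :=
  let rules3 := cutrules Lsingle 3
  let excp := rules3.foldl excpStep []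
  ([[1,2,3],[1,3,2],[2,1,3],[2,3,1],[3,1,2],[3,2,1]] : List (List Int)).foldl
    (fun res q => if ¬ (q ∈ excp) then res ++ [q] else res) []

-- ===== PORT B =====
-- port of Source B's _parse: 'aNb' (a,b digits 1..3) parsed into (a,b);
-- string handled as List Char (exact: code[i] on a length-3 list), int(code[i]) as char code - 48 (exact on digits)
def parseCode (s : String) : Option (Int × Int) :=
  match s.toList with
  | [a, 'N', b] =>
    if a ∈ ['1','2','3'] ∧ b ∈ ['1','2','3'] then
      some (((a.toNat : Int) - 48), ((b.toNat : Int) - 48))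
    else none
  | _ => none

def string123_alt (Lsingle : List ((Int × Int × Int) × String)) : List (List Int) :=
  let pairs := Lsingle.filterMap (fun v => if v.1.2.2 = 3 then parseCode v.2 else none)
  ([[1,2,3],[1,3,2],[2,1,3],[2,3,1],[3,1,2],[3,2,1]] : List (List Int)).filter
    (fun q => ¬ pairs.any (fun ab => PySem.List.pyGet? q (ab.2 - 1) == some ab.1))

-- ===== PRECONDITION & SPEC =====
def Spec_string123 (Lsingle : List ((Int × Int × Int) × String)) (out : List (List Int)) : Prop := out = string123_alt Lsingle
instance (Lsingle : List ((Int × Int × Int) × String)) (out : List (List Int)) : Decidable (Spec_string123 Lsingle out) := by unfold Spec_string123; infer_instance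

-- ===== CLAIM (what is proved, stated in full; the proofs are below) =====
def Claim_equal_string123 : Prop := ∀ (Lsingle : List ((Int × Int × Int) × String)), Dom_string123 Lsingle → Spec_string123 Lsingle (string123 Lsingle)

-- ===== LEMMAS AND PROOFS =====

-- per-rule contribution of A's excp loop
def contrib (s : String) : List (List Int) :=
  (if s = "1N3" then [[2,3,1],[3,2,1]] else []) ++
  (if s = "1N2" then [[2,1,3],[3,1,2]] else []) ++
  (if s = "2N1" then [[2,1,3],[2,3,1]] else []) ++
  (if s = "2N3" then [[1,3,2],[3,1,2]] else []) ++
  (if s = "3N1" then [[3,1,2],[3,2,1]] else []) ++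
  (if s = "3N2" then [[1,3,2],[2,3,1]] else []) ++
  (if s = "1N1" then [[1,2,3],[1,3,2]] else []) ++
  (if s = "2N2" then [[1,2,3],[3,2,1]] else []) ++
  (if s = "3N3" then [[1,2,3],[2,1,3]] else [])

lemma ite_app {α : Type} (c : Prop) [Decidable c] (e x : List α) :
    (if c then e ++ x else e) = e ++ (if c then x else []) := by
  split <;> simp

lemma excpStep_eq (e : List (List Int)) (r : (Int × Int × Int) × String) :
    excpStep e r = e ++ contrib r.2 := by
  simp only [excpStep, ite_app]
  simp only [contrib, List.append_assoc]

lemma foldl_excpStep_init (l : List ((Int × Int × Int) × String)) (init : List (List Int)) :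
    l.foldl excpStep init = init ++ l.flatMap (fun r => contrib r.2) := by
  induction l generalizing init with
  | nil => simp
  | cons r l ih => simp [List.foldl_cons, ih, excpStep_eq]

lemma cutrules_eq (L : List ((Int × Int × Int) × String)) (k : Int) :
    cutrules L k = L.filter (fun v => v.1.2.2 = k) := by
  unfold cutrules
  rw [PySem.List.foldl_append_ite_eq_filter]
  simp

-- the nine three-character rule codes, as toList facts used to invert parseCode
lemma tl1 : ("1N3":String).toList = ['1','N','3'] := by decide
lemma tl2 : ("1N2":String).toList = ['1','N','2'] := by decide
lemma tl3 : ("2N1":String).toList = ['2','N','1'] := by decide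
lemma tl4 : ("2N3":String).toList = ['2','N','3'] := by decide
lemma tl5 : ("3N1":String).toList = ['3','N','1'] := by decide
lemma tl6 : ("3N2":String).toList = ['3','N','2'] := by decide
lemma tl7 : ("1N1":String).toList = ['1','N','1'] := by decide
lemma tl8 : ("2N2":String).toList = ['2','N','2'] := by decide
lemma tl9 : ("3N3":String).toList = ['3','N','3'] := by decide

-- parseCode succeeds only on the nine rule codes
lemma parseCode_shape (s : String) (ab : Int × Int) (h : parseCode s = some ab) :
    s = "1N3" ∨ s = "1N2" ∨ s = "2N1" ∨ s = "2N3" ∨ s = "3N1" ∨ s = "3N2" ∨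
    s = "1N1" ∨ s = "2N2" ∨ s = "3N3" := by
  unfold parseCode at h
  split at h
  case h_1 a b heq =>
    split at h
    case isTrue hm =>
      obtain ⟨ha, hb⟩ := hm
      simp only [List.mem_cons, List.not_mem_nil, or_false] at ha hb
      rcases ha with rfl | rfl | rfl <;> rcases hb with rfl | rfl | rfl <;>
        [ (have hs := String.toList_inj.mp (heq.trans tl7.symm); tauto);
          (have hs := String.toList_inj.mp (heq.trans tl2.symm); tauto);
          (have hs := String.toList_inj.mp (heq.trans tl1.symm); tauto);
          (have hs := String.toList_inj.mp (heq.trans tl3.symm); tauto);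
          (have hs := String.toList_inj.mp (heq.trans tl8.symm); tauto);
          (have hs := String.toList_inj.mp (heq.trans tl4.symm); tauto);
          (have hs := String.toList_inj.mp (heq.trans tl5.symm); tauto);
          (have hs := String.toList_inj.mp (heq.trans tl6.symm); tauto);
          (have hs := String.toList_inj.mp (heq.trans tl9.symm); tauto)]
    case isFalse => exact absurd h (by simp)
  case h_2 => exact absurd h (by simp)

-- pointwise: for a permutation q of the six, membership in contrib s matches B's parsed predicate
lemma contrib_parse (s : String)
    (q : List Int) (hq : q ∈ ([[1,2,3],[1,3,2],[2,1,3],[2,3,1],[3,1,2],[3,2,1]] : List (List Int))) :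
    (q ∈ contrib s) ↔
      ∃ ab : Int × Int, parseCode s = some ab ∧
        (PySem.List.pyGet? q (ab.2 - 1) == some ab.1) = true := by
  simp only [List.mem_cons, List.not_mem_nil, or_false] at hq
  by_cases h1 : s = "1N3"
  · subst h1; rw [show parseCode "1N3" = some (1,3) from by simp [parseCode, tl1],
       show contrib "1N3" = ([[2,3,1],[3,2,1]] : List (List Int)) from by simp [contrib]]
    simp only [Option.some.injEq, exists_eq_left']
    rcases hq with rfl|rfl|rfl|rfl|rfl|rfl <;> decide
  by_cases h2 : s = "1N2"
  · subst h2; rw [show parseCode "1N2" = some (1,2) from by simp [parseCode, tl2],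
       show contrib "1N2" = ([[2,1,3],[3,1,2]] : List (List Int)) from by simp [contrib]]
    simp only [Option.some.injEq, exists_eq_left']
    rcases hq with rfl|rfl|rfl|rfl|rfl|rfl <;> decide
  by_cases h3 : s = "2N1"
  · subst h3; rw [show parseCode "2N1" = some (2,1) from by simp [parseCode, tl3],
       show contrib "2N1" = ([[2,1,3],[2,3,1]] : List (List Int)) from by simp [contrib]]
    simp only [Option.some.injEq, exists_eq_left']
    rcases hq with rfl|rfl|rfl|rfl|rfl|rfl <;> decide
  by_cases h4 : s = "2N3"
  · subst h4; rw [show parseCode "2N3" = some (2,3) from by simp [parseCode, tl4],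
       show contrib "2N3" = ([[1,3,2],[3,1,2]] : List (List Int)) from by simp [contrib]]
    simp only [Option.some.injEq, exists_eq_left']
    rcases hq with rfl|rfl|rfl|rfl|rfl|rfl <;> decide
  by_cases h5 : s = "3N1"
  · subst h5; rw [show parseCode "3N1" = some (3,1) from by simp [parseCode, tl5],
       show contrib "3N1" = ([[3,1,2],[3,2,1]] : List (List Int)) from by simp [contrib]]
    simp only [Option.some.injEq, exists_eq_left']
    rcases hq with rfl|rfl|rfl|rfl|rfl|rfl <;> decide
  by_cases h6 : s = "3N2"
  · subst h6; rw [show parseCode "3N2" = some (3,2) from by simp [parseCode, tl6],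
       show contrib "3N2" = ([[1,3,2],[2,3,1]] : List (List Int)) from by simp [contrib]]
    simp only [Option.some.injEq, exists_eq_left']
    rcases hq with rfl|rfl|rfl|rfl|rfl|rfl <;> decide
  by_cases h7 : s = "1N1"
  · subst h7; rw [show parseCode "1N1" = some (1,1) from by simp [parseCode, tl7],
       show contrib "1N1" = ([[1,2,3],[1,3,2]] : List (List Int)) from by simp [contrib]]
    simp only [Option.some.injEq, exists_eq_left']
    rcases hq with rfl|rfl|rfl|rfl|rfl|rfl <;> decide
  by_cases h8 : s = "2N2"
  · subst h8; rw [show parseCode "2N2" = some (2,2) from by simp [parseCode, tl8],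
       show contrib "2N2" = ([[1,2,3],[3,2,1]] : List (List Int)) from by simp [contrib]]
    simp only [Option.some.injEq, exists_eq_left']
    rcases hq with rfl|rfl|rfl|rfl|rfl|rfl <;> decide
  by_cases h9 : s = "3N3"
  · subst h9; rw [show parseCode "3N3" = some (3,3) from by simp [parseCode, tl9],
       show contrib "3N3" = ([[1,2,3],[2,1,3]] : List (List Int)) from by simp [contrib]]
    simp only [Option.some.injEq, exists_eq_left']
    rcases hq with rfl|rfl|rfl|rfl|rfl|rfl <;> decide
  · constructor
    · intro hm
      rw [show contrib s = [] from by simp [contrib, h1, h2, h3, h4, h5, h6, h7, h8, h9]] at hm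
      exact absurd hm (List.not_mem_nil)
    · rintro ⟨ab, hp, -⟩
      rcases parseCode_shape s ab hp with h|h|h|h|h|h|h|h|h <;> tauto

theorem key (L : List ((Int × Int × Int) × String))
    (q : List Int) (hq : q ∈ ([[1,2,3],[1,3,2],[2,1,3],[2,3,1],[3,1,2],[3,2,1]] : List (List Int))) :
    (q ∈ (cutrules L 3).foldl excpStep []) ↔
      ((L.filterMap (fun v => if v.1.2.2 = 3 then parseCode v.2 else none)).any
        (fun ab => PySem.List.pyGet? q (ab.2 - 1) == some ab.1)) = true := by
  rw [foldl_excpStep_init, cutrules_eq]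
  simp only [List.nil_append, List.mem_flatMap, List.mem_filter, List.any_eq_true, List.mem_filterMap]
  constructor
  · rintro ⟨v, ⟨hv, hc⟩, hm⟩
    rcases (contrib_parse v.2 q hq).1 hm with ⟨ab, hp, hpred⟩
    exact ⟨ab, ⟨v, hv, by simp_all⟩, hpred⟩
  · rintro ⟨ab, ⟨v, hv, hp⟩, hpred⟩
    by_cases hc : v.1.2.2 = 3
    · rw [if_pos hc] at hp
      exact ⟨v, ⟨hv, by simp [hc]⟩, (contrib_parse v.2 q hq).2 ⟨ab, hp, hpred⟩⟩
    · rw [if_neg hc] at hp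
      exact absurd hp (by simp)

-- ===== VERDICT (by name: the statement is the Claim_ definition above) =====
theorem string123_spec : Claim_equal_string123 := by
  intro L _
  unfold Spec_string123 string123 string123_alt
  rw [PySem.List.foldl_append_ite_eq_filter]
  simp only [List.nil_append]
  apply List.filter_congr
  intro q hq
  have := key L q hq
  by_cases h : q ∈ (cutrules L 3).foldl excpStep [] <;> simp_all
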